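-- pv_equiv track=rewrite | github.com/pgxxyyxx/openspawn | openspawn/scanner.py | _describe_text_change
-- ===== SOURCE A (Python) =====
-- def _describe_text_change(old_text: str, new_text: str) -> str:
--     if not old_text or not new_text:
--         return ""
--     old_lines = old_text.splitlines()
--     new_lines = new_text.splitlines()
--     delta = len(new_lines) - len(old_lines)
--     parts: list[str] = []
--     if delta > 0:
--         parts.append(f"grew by {delta} lines")
--     elif delta < 0:
--         parts.append(f"shortened by {abs(delta)} lines")
--     for index, (old_line, new_line) in enumerate(zip(old_lines, new_lines), start=1):
--         if old_line != new_line: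
--             parts.append(f"first difference near line {index}")
--             break
--     else:
--         if len(old_lines) != len(new_lines):
--             parts.append(f"first difference near line {min(len(old_lines), len(new_lines)) + 1}")
--     return ", ".join(parts)
-- ===== SOURCE B (Python) =====
-- def _describe_text_change(old_text: str, new_text: str) -> str:
--     if not old_text or not new_text:
--         return ""
--     old_lines = old_text.splitlines()
--     new_lines = new_text.splitlines()
--     delta = len(new_lines) - len(old_lines)
--     parts = []
--     if delta > 0:
--         parts.append(f"grew by {delta} lines")
--     elif delta < 0:
--         parts.append(f"shortened by {abs(delta)} lines")
--     # Binary search for the longest equal prefix of the two line lists.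
--     # Prefix equality is monotone (if length-k prefixes are equal, so are all
--     # shorter ones), so binary search on the prefix length is correct.
--     lo, hi = 0, min(len(old_lines), len(new_lines))
--     while lo < hi:
--         mid = (lo + hi + 1) // 2
--         if old_lines[:mid] == new_lines[:mid]:
--             lo = mid
--         else:
--             hi = mid - 1
--     if lo < len(old_lines) or lo < len(new_lines):
--         parts.append(f"first difference near line {lo + 1}")
--     return ", ".join(parts)
-- ===== Notes on version B (the rewrite author's own statement) =====
-- stated objective: alternative
-- what changed: Replaces A's linear enumerate/zip for/else scan for the first differing line by a BINARY SEARCH on the length of the longest equal line-prefix (valid because prefix equality is monotone in the prefix length), and merges A's two reporting branches into one unified condition lo < len(old_lines) or lo < len(new_lines).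
import Mathlib
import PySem

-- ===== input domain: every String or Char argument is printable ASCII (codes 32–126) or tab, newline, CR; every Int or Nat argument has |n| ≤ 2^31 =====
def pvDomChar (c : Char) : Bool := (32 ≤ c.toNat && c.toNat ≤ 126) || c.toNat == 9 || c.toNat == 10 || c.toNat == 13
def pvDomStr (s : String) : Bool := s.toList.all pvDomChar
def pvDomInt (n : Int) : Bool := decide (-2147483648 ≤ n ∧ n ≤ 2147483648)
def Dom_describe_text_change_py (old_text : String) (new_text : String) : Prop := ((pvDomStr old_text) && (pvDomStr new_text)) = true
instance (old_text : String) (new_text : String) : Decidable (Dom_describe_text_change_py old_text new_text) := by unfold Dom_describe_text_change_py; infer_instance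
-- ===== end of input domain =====

-- B finds the longest equal line-prefix by BINARY SEARCH on the prefix length (valid since prefix equality is monotone) instead of A's linear for/else scan, and unifies A's two reporting branches into one condition (alternative decomposition; same observable result).


-- ===== PORT A =====
-- A's for-loop over enumerate(zip(old_lines, new_lines), start=1) with break: returns the
-- 1-based index of the first mismatching pair (some i), or none if the loop runs out (the else branch).
def pvLoopA (i : Int) (pairs : List (String × String)) : Option Int :=
  match pairs with
  | [] => none
  | (o, n) :: rest => if o ≠ n then some i else pvLoopA (i + 1) rest

def pvBuildA (old_lines new_lines : List String) : List String :=
  let delta : Int := (new_lines.length : Int) - (old_lines.length : Int)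
  let parts : List String :=
    if 0 < delta then ["grew by " ++ PySem.Int.toStr delta ++ " lines"]
    else if delta < 0 then ["shortened by " ++ PySem.Int.toStr (-delta) ++ " lines"]
    else []
  match pvLoopA 1 (old_lines.zip new_lines) with
  | some i => parts ++ ["first difference near line " ++ PySem.Int.toStr i]
  | none =>
      if old_lines.length ≠ new_lines.length then
        parts ++ ["first difference near line " ++ PySem.Int.toStr ((min old_lines.length new_lines.length : Nat) + 1)]
      else parts

def describe_text_change_py (old_text : String) (new_text : String) : String :=
  if old_text = "" ∨ new_text = "" then ""
  else PySem.Str.join ", " (pvBuildA (PySem.Str.splitlines old_text) (PySem.Str.splitlines new_text))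

-- ===== PORT B =====
-- B's while-loop: binary search for the largest k with old_lines[:k] == new_lines[:k].
def pvBinSearch (os ns : List String) (lo hi : Int) : Int :=
  if h : lo < hi then
    let mid := PySem.Int.floordiv (lo + hi + 1) 2
    if PySem.List.slice os none (some mid) = PySem.List.slice ns none (some mid)
    then pvBinSearch os ns mid hi
    else pvBinSearch os ns lo (mid - 1)
  else lo
termination_by (hi - lo).toNat
decreasing_by
  · have h2 : PySem.Int.floordiv (lo + hi + 1) 2 = (lo + hi + 1) / 2 :=
      PySem.Int.floordiv_eq_ediv_of_pos (by omega)
    simp only [h2]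
    omega
  · have h2 : PySem.Int.floordiv (lo + hi + 1) 2 = (lo + hi + 1) / 2 :=
      PySem.Int.floordiv_eq_ediv_of_pos (by omega)
    simp only [h2]
    omega

def pvBuildB (old_lines new_lines : List String) : List String :=
  let delta : Int := (new_lines.length : Int) - (old_lines.length : Int)
  let parts : List String :=
    if 0 < delta then ["grew by " ++ PySem.Int.toStr delta ++ " lines"]
    else if delta < 0 then ["shortened by " ++ PySem.Int.toStr (-delta) ++ " lines"]
    else []
  let lo := pvBinSearch old_lines new_lines 0 ((min old_lines.length new_lines.length : Nat) : Int)
  if lo < (old_lines.length : Int) ∨ lo < (new_lines.length : Int) then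
    parts ++ ["first difference near line " ++ PySem.Int.toStr (lo + 1)]
  else parts

def describe_text_change_py_alt (old_text : String) (new_text : String) : String :=
  if old_text = "" ∨ new_text = "" then ""
  else PySem.Str.join ", " (pvBuildB (PySem.Str.splitlines old_text) (PySem.Str.splitlines new_text))

-- ===== PRECONDITION & SPEC =====
def Spec_describe_text_change_py (old_text : String) (new_text : String) (out : String) : Prop := out = describe_text_change_py_alt old_text new_text
instance (old_text : String) (new_text : String) (out : String) : Decidable (Spec_describe_text_change_py old_text new_text out) := by unfold Spec_describe_text_change_py; infer_instance

-- ===== CLAIM (what is proved, stated in full; the proofs are below) =====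
def Claim_equal_describe_text_change_py : Prop := ∀ (old_text : String) (new_text : String), Dom_describe_text_change_py old_text new_text → Spec_describe_text_change_py old_text new_text (describe_text_change_py old_text new_text)

-- ===== LEMMAS AND PROOFS =====

-- Length of the longest common prefix of two lists (proof-side characterisation).
def pvCommonLen (os ns : List String) : Nat :=
  match os, ns with
  | o :: os, n :: ns => if o = n then pvCommonLen os ns + 1 else 0
  | _, _ => 0

theorem pvCommonLen_le (os ns : List String) : pvCommonLen os ns ≤ min os.length ns.length := by
  induction os generalizing ns with
  | nil => simp [pvCommonLen]
  | cons o os ih =>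
      cases ns with
      | nil => simp [pvCommonLen]
      | cons n ns =>
          by_cases h : o = n
          · simp only [pvCommonLen, h, if_true, List.length_cons]
            have := ih ns; omega
          · simp [pvCommonLen, h]

theorem pvTake_eq_iff (os ns : List String) (k : Nat) (hk : k ≤ min os.length ns.length) :
    os.take k = ns.take k ↔ k ≤ pvCommonLen os ns := by
  induction os generalizing ns k with
  | nil => simp at hk; simp [hk]
  | cons o os ih =>
      cases ns with
      | nil => simp at hk; simp [hk]
      | cons n ns =>
          cases k with
          | zero => simp
          | succ k =>
              simp only [List.take_succ_cons, List.cons.injEq]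
              by_cases h : o = n
              · simp only [pvCommonLen, h, if_true, true_and]
                rw [ih ns k (by simp at hk ⊢; omega)]
                omega
              · simp [pvCommonLen, h]

-- A's scan: some (i + common) if it finds a mismatch within the zipped prefix, else none.
theorem pvLoopA_char (os ns : List String) (i : Int) :
    pvLoopA i (os.zip ns) =
      if pvCommonLen os ns < min os.length ns.length
      then some (i + (pvCommonLen os ns : Int)) else none := by
  induction os generalizing ns i with
  | nil => simp [pvLoopA, pvCommonLen]
  | cons o os ih =>
      cases ns with
      | nil => simp [pvLoopA, pvCommonLen]
      | cons n ns =>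
          by_cases h : o = n
          · simp only [List.zip_cons_cons, pvLoopA, h, ne_eq, not_true_eq_false, if_false,
              pvCommonLen, if_true, List.length_cons]
            rw [ih ns (i + 1)]
            have hle := pvCommonLen_le os ns
            by_cases hlt : pvCommonLen os ns < min os.length ns.length
            · rw [if_pos hlt, if_pos (by omega)]
              congr 1
              push_cast
              ring
            · rw [if_neg hlt, if_neg (by omega)]
          · simp only [List.zip_cons_cons, pvLoopA, h, ne_eq, not_false_eq_true, if_true,
              pvCommonLen, if_false, List.length_cons]
            rw [if_pos (by omega)]
            simp

-- B's binary search converges to the common-prefix length.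
theorem pvBinSearch_correct (os ns : List String) :
    ∀ (d : Nat) (lo hi : Int), (hi - lo).toNat = d →
      0 ≤ lo → lo ≤ (pvCommonLen os ns : Int) → (pvCommonLen os ns : Int) ≤ hi →
      hi ≤ ((min os.length ns.length : Nat) : Int) →
      pvBinSearch os ns lo hi = (pvCommonLen os ns : Int) := by
  intro d
  induction d using Nat.strong_induction_on with
  | _ d ih =>
      intro lo hi hd hlo hlc hch hhm
      rw [pvBinSearch]
      by_cases h : lo < hi
      · rw [dif_pos h]
        have h2 : PySem.Int.floordiv (lo + hi + 1) 2 = (lo + hi + 1) / 2 :=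
          PySem.Int.floordiv_eq_ediv_of_pos (by omega)
        simp only [h2]
        set mid : Int := (lo + hi + 1) / 2 with hmid
        have hmb : lo < mid ∧ mid ≤ hi := by omega
        have hm0 : 0 ≤ mid := by omega
        have hsl : PySem.List.slice os none (some mid) = os.take mid.toNat :=
          PySem.List.slice_to os hm0
        have hsr : PySem.List.slice ns none (some mid) = ns.take mid.toNat :=
          PySem.List.slice_to ns hm0
        have hmm : mid.toNat ≤ min os.length ns.length := by omega
        by_cases heq : PySem.List.slice os none (some mid) = PySem.List.slice ns none (some mid)
        · rw [if_pos heq]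
          rw [hsl, hsr] at heq
          have hle : mid ≤ (pvCommonLen os ns : Int) := by
            have := (pvTake_eq_iff os ns mid.toNat hmm).mp heq
            omega
          exact ih (hi - mid).toNat (by omega) mid hi rfl (by omega) hle hch hhm
        · rw [if_neg heq]
          have hgt : (pvCommonLen os ns : Int) < mid := by
            by_contra hc
            apply heq
            rw [hsl, hsr]
            exact (pvTake_eq_iff os ns mid.toNat hmm).mpr (by omega)
          exact ih (mid - 1 - lo).toNat (by omega) lo (mid - 1) rfl hlo hlc (by omega) (by omega)
      · rw [dif_neg h]
        omega

theorem pvBuild_eq (os ns : List String) : pvBuildA os ns = pvBuildB os ns := by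
  have hle := pvCommonLen_le os ns
  have hbs : pvBinSearch os ns 0 ((min os.length ns.length : Nat) : Int) = (pvCommonLen os ns : Int) :=
    pvBinSearch_correct os ns (min os.length ns.length) 0 _ (by omega) (by omega) (by omega)
      (by exact_mod_cast hle) (by omega)
  unfold pvBuildA pvBuildB
  rw [pvLoopA_char]
  simp only [hbs]
  by_cases hlt : pvCommonLen os ns < min os.length ns.length
  · have h3 : ((pvCommonLen os ns : Int) < (os.length : Int) ∨ (pvCommonLen os ns : Int) < (ns.length : Int)) := by
      omega
    rw [if_pos hlt]
    simp only
    rw [if_pos h3]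
    congr 4
    omega
  · rw [if_neg hlt]
    simp only
    by_cases hne : os.length = ns.length
    · have h4 : ¬ ((pvCommonLen os ns : Int) < (os.length : Int) ∨ (pvCommonLen os ns : Int) < (ns.length : Int)) := by
        omega
      rw [if_neg (by omega : ¬ os.length ≠ ns.length), if_neg h4]
    · have h3 : ((pvCommonLen os ns : Int) < (os.length : Int) ∨ (pvCommonLen os ns : Int) < (ns.length : Int)) := by
        omega
      rw [if_pos hne, if_pos h3]
      congr 4
      omega
-- ===== VERDICT (by name: the statement is the Claim_ definition above) =====
theorem describe_text_change_py_spec : Claim_equal_describe_text_change_py := by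
  intro old_text new_text _
  unfold Spec_describe_text_change_py describe_text_change_py describe_text_change_py_alt
  by_cases h : old_text = "" ∨ new_text = ""
  · rw [if_pos h, if_pos h]
  · rw [if_neg h, if_neg h, pvBuild_eq]
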